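-- pv_equiv track=rewrite | github.com/Anish932-hash/J.A.R.V.I.S. | core/advanced/code_optimizer.py | _optimize_nested_loops
-- ===== SOURCE A (Python) =====
-- from typing import Dict, List, Any, Optional, Tuple
--
-- def _optimize_nested_loops(code: str, bottleneck: Dict[str, Any]) -> str:
--     """Optimize nested loops"""
--     # This is a complex optimization that would require deep analysis
--     # For now, add optimization comments
--     lines = code.split('\n')
--     complexity = bottleneck.get('complexity', 2)
--
--     if complexity > 2:
--         # Add optimization comment for highly nested loops
--         for i, line in enumerate(lines):
--             if 'for ' in line and any('for ' in l for l in lines[max(0, i-2):i+3]):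
--                 lines.insert(i, "# OPTIMIZATION: Consider loop unrolling or algorithm optimization")
--                 break
--
--     return '\n'.join(lines)
-- ===== SOURCE B (Python) =====
-- # B: works on the raw string instead of a line list: find the first 'for '
-- # occurrence, locate its line start with rfind('\n'), and splice the comment
-- # line in by string slicing; no split/enumerate/insert/join pass.
-- _COMMENT = "# OPTIMIZATION: Consider loop unrolling or algorithm optimization\n"
--
-- def _optimize_nested_loops(code: str, bottleneck) -> str:
--     if bottleneck.get('complexity', 2) <= 2:
--         return code
--     pos = code.find('for ')
--     if pos == -1:
--         return code
--     start = code.rfind('\n', 0, pos) + 1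
--     return code[:start] + _COMMENT + code[start:]
-- ===== Notes on version B (the rewrite author's own statement) =====
-- stated objective: simpler
-- what changed: B never builds a line list: instead of A's split('\n')/enumerate loop with a windowed any() test, an in-place insert and a join, B indexes the raw string directly - code.find('for ') locates the first occurrence (the any() window always contains line i itself, so 'first line containing "for "' is exactly 'line of the first occurrence'), code.rfind('\n', 0, pos)+1 gives that line's start, and the comment line is spliced in by slicing.
import Mathlib
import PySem

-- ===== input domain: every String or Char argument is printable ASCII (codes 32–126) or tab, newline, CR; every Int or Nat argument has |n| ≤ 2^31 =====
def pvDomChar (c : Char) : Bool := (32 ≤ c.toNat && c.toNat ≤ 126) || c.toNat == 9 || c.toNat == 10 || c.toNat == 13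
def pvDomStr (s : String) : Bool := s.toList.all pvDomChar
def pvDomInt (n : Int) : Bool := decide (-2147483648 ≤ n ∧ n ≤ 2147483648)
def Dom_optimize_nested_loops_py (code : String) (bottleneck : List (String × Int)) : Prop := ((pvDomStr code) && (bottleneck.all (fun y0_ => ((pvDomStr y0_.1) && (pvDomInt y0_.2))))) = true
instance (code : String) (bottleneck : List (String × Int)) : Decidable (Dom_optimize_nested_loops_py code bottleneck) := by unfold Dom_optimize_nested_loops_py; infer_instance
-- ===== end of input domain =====

-- B replaces A's split-into-lines / enumerate / windowed-any / insert / join pass by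
-- direct raw-string indexing: find the first 'for ' occurrence, locate its line start
-- with rfind('\n'), and splice the comment line in by slicing; objective: simpler.

-- ===== PORT A =====
-- the comment line A inserts
def pvComment : String := "# OPTIMIZATION: Consider loop unrolling or algorithm optimization"

-- A's `for i, line in enumerate(lines)` loop with its `break`: scan from index i,
-- insert at the first line whose test fires and stop.
def pvALoop (lines : List String) (i : Nat) : List String :=
  if h : i < lines.length then
    if PySem.Str.isIn "for " lines[i]
        && (PySem.List.slice lines (some (max 0 ((i:Int)-2))) (some ((i:Int)+3))).any
             (fun l => PySem.Str.isIn "for " l)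
    then PySem.List.insert lines (i:Int) pvComment
    else pvALoop lines (i+1)
  else lines
termination_by lines.length - i

def optimize_nested_loops_py (code : String) (bottleneck : List (String × Int)) : String :=
  let lines := (PySem.Str.split? code "\n").getD []
  let complexity := (PySem.Dict.ofList bottleneck).getD "complexity" 2
  let lines' := if complexity > 2 then pvALoop lines 0 else lines
  PySem.Str.join "\n" lines'

-- ===== PORT B =====
-- Source B's module constant _COMMENT (the comment line plus its newline)
def pvCommentNl : String := "# OPTIMIZATION: Consider loop unrolling or algorithm optimization\n"

def optimize_nested_loops_py_alt (code : String) (bottleneck : List (String × Int)) : String :=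
  if (PySem.Dict.ofList bottleneck).getD "complexity" 2 ≤ 2 then code
  else
    let pos := PySem.Str.find code "for "
    if pos = -1 then code
    else
      let start := PySem.Str.rfindFrom code "\n" 0 (some pos) + 1
      PySem.Str.slice code none (some start) ++ pvCommentNl ++ PySem.Str.slice code (some start) none

-- ===== PRECONDITION & SPEC =====
def Spec_optimize_nested_loops_py (code : String) (bottleneck : List (String × Int)) (out : String) : Prop := out = optimize_nested_loops_py_alt code bottleneck
instance (code : String) (bottleneck : List (String × Int)) (out : String) : Decidable (Spec_optimize_nested_loops_py code bottleneck out) := by unfold Spec_optimize_nested_loops_py; infer_instance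

-- ===== CLAIM (what is proved, stated in full; the proofs are below) =====
def Claim_equal_optimize_nested_loops_py : Prop := ∀ (code : String) (bottleneck : List (String × Int)), Dom_optimize_nested_loops_py code bottleneck → Spec_optimize_nested_loops_py code bottleneck (optimize_nested_loops_py code bottleneck)

-- ===== LEMMAS AND PROOFS =====

-- the search pattern, the comment line, and the comment line with newline, as char lists
def pvPat : List Char := "for ".toList
def pvCm : List Char := pvComment.toList
def pvCN : List Char := pvCommentNl.toList

lemma pvCN_eq : pvCN = pvCm ++ ['\n'] := rfl
lemma pvPat_no_nl : '\n' ∉ pvPat := by decide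

-- B's core computation on char lists (what the B port's string operations amount to)
def pvBchars (cs : List Char) : List Char :=
  let pos := PySem.Chars.find cs pvPat
  if pos = -1 then cs
  else
    let start := PySem.Chars.rfind (cs.take pos.toNat) ['\n'] + 1
    cs.take start.toNat ++ pvCN ++ cs.drop start.toNat

-- structural form of PySem.Chars.splitOn for the one-character separator '\n'
def pvSp : List Char → List Char → List (List Char)
  | [], cur => [cur.reverse]
  | c :: rest, cur => if c = '\n' then cur.reverse :: pvSp rest [] else pvSp rest (c :: cur)

lemma pvSp_ne_nil (l cur : List Char) : pvSp l cur ≠ [] := by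
  induction l generalizing cur with
  | nil => simp [pvSp]
  | cons c rest ih =>
    simp only [pvSp]
    split
    · simp
    · exact ih _

lemma pvSp_no_nl (l : List Char) : ∀ cur, '\n' ∉ cur → ∀ p ∈ pvSp l cur, '\n' ∉ p := by
  induction l with
  | nil =>
    intro cur hcur p hp
    simp only [pvSp, List.mem_singleton] at hp
    subst hp; simpa using hcur
  | cons c rest ih =>
    intro cur hcur p hp
    simp only [pvSp] at hp
    by_cases hc : c = '\n'
    · rw [if_pos hc] at hp
      rcases List.mem_cons.mp hp with h | h
      · subst h; simpa using hcur
      · exact ih [] (by simp) p h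
    · rw [if_neg hc] at hp
      exact ih (c :: cur) (by simp [hcur, Ne.symm hc]) p hp

lemma pvGo_eq : ∀ (fuel : Nat) (l cur : List Char) (acc : List (List Char)), l.length < fuel →
    PySem.Chars.splitOn.go ['\n'] fuel l cur acc = acc.reverse ++ pvSp l cur := by
  intro fuel
  induction fuel with
  | zero => intro l cur acc h; omega
  | succ fuel ih =>
    intro l cur acc h
    cases l with
    | nil => simp [PySem.Chars.splitOn.go, pvSp]
    | cons c rest =>
      simp only [PySem.Chars.splitOn.go, List.isPrefixOf, List.length_cons] at *
      by_cases hc : c = '\n'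
      · subst hc
        rw [if_pos (by simp)]
        simp only [List.length_nil, List.drop_succ_cons, List.drop_zero]
        rw [ih rest [] (List.reverse cur :: acc) (by omega)]
        simp [pvSp]
      · rw [if_neg (by simp only [Bool.and_true, beq_iff_eq]; exact fun h' => hc h'.symm)]
        rw [ih rest (c :: cur) acc (by omega)]
        simp [pvSp, hc]

lemma pvJoin_sp : ∀ (l cur : List Char), PySem.Chars.join ['\n'] (pvSp l cur) = cur.reverse ++ l := by
  intro l
  induction l with
  | nil => intro cur; simp [pvSp, PySem.Chars.join_singleton]
  | cons c rest ih =>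
    intro cur
    simp only [pvSp]
    by_cases hc : c = '\n'
    · rw [if_pos hc]
      cases heq : pvSp rest [] with
      | nil => exact absurd heq (pvSp_ne_nil _ _)
      | cons a t =>
        rw [PySem.Chars.join_cons_cons]
        rw [← heq, ih []]
        simp [hc]
    · rw [if_neg hc, ih (c :: cur)]
      simp

-- code.split('\n') at the char level is pvSp
lemma pvSplit_char (code : String) :
    ((PySem.Str.split? code "\n").getD []).map String.toList = pvSp code.toList [] := by
  have hsep : ("\n" : String).toList = ['\n'] := rfl
  have hsplit := PySem.Str.split?_map code "\n"
  rw [hsep] at hsplit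
  rw [show PySem.Chars.split? code.toList ['\n']
        = some (PySem.Chars.splitOn code.toList ['\n']) by simp [PySem.Chars.split?]] at hsplit
  cases h : PySem.Str.split? code "\n" with
  | none => rw [h] at hsplit; simp at hsplit
  | some ls =>
    rw [h] at hsplit
    simp only [Option.map_some, Option.some.injEq] at hsplit
    rw [Option.getD_some, hsplit]
    rw [show PySem.Chars.splitOn code.toList ['\n']
          = PySem.Chars.splitOn.go ['\n'] (code.toList.length + 1) code.toList [] [] from rfl]
    rw [pvGo_eq _ _ _ _ (by omega)]
    simp

-- '\n'.join(code.split('\n')) = code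
lemma pvRoundtrip (code : String) :
    PySem.Str.join "\n" ((PySem.Str.split? code "\n").getD []) = code := by
  apply String.toList_inj.mp
  rw [PySem.Str.toList_join, show ("\n" : String).toList = ['\n'] from rfl, pvSplit_char]
  simpa using pvJoin_sp code.toList []

-- join of a cons (tail nonempty)
lemma pvJoin_cons (x : List Char) (M : List (List Char)) (h : M ≠ []) :
    PySem.Chars.join ['\n'] (x :: M) = x ++ '\n' :: PySem.Chars.join ['\n'] M := by
  cases M with
  | nil => exact absurd rfl h
  | cons y t => rw [PySem.Chars.join_cons_cons]; simp

-- ---- occurrence transfer across the '\n' separator ----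

lemma pvPrefix_append_left {p v : List Char} (w : List Char) (h : p.length ≤ v.length) :
    p <+: v ++ w ↔ p <+: v := by
  rw [List.prefix_iff_eq_take, List.prefix_iff_eq_take, List.take_append_of_le_length h]

lemma pvNoSpan {p a b : List Char} {j : Nat} (hnl : '\n' ∉ p) (h1 : j ≤ a.length)
    (h2 : a.length < j + p.length) (h : p <+: (a ++ '\n' :: b).drop j) : False := by
  have hi : a.length - j < p.length := by omega
  have hlen : j + (a.length - j) < (a ++ '\n' :: b).length := by
    simp only [List.length_append, List.length_cons]; omega
  have := h.getElem (i := a.length - j)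
    (by simpa [List.length_drop, List.length_append, List.length_cons] using hi)
  rw [List.getElem_drop] at this
  have hat : (a ++ '\n' :: b)[j + (a.length - j)]'hlen = '\n' := by
    have : j + (a.length - j) = a.length := by omega
    simp [this, List.getElem_append_right (Nat.le_refl a.length)]
  rw [hat] at this
  exact hnl (this ▸ List.getElem_mem hi)

lemma pvDrop_right (a b : List Char) (k : Nat) :
    (a ++ '\n' :: b).drop (a.length + 1 + k) = b.drop k := by
  rw [List.drop_append]
  have h1 : a.length + 1 + k - a.length = 1 + k := by omega
  rw [List.drop_eq_nil_of_le (by omega), h1]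
  simp [Nat.add_comm 1 k]

lemma pvDrop_left (a : List Char) (x : List Char) {j : Nat} (h : j ≤ a.length) :
    (a ++ x).drop j = a.drop j ++ x := by
  have h0 : j - a.length = 0 := by omega
  rw [List.drop_append, h0, List.drop_zero]

lemma pvInfix_split {p : List Char} (a b : List Char) (hnl : '\n' ∉ p) :
    p <:+: a ++ '\n' :: b ↔ p <:+: a ∨ p <:+: b := by
  constructor
  · intro h
    obtain ⟨j, hj⟩ := (PySem.Chars.exists_prefix_drop_iff_isIn p (a ++ '\n' :: b)).mpr
      ((PySem.Chars.isIn_iff_infix p _).mpr h)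
    by_cases hja : j ≤ a.length
    · by_cases hfit : j + p.length ≤ a.length
      · left
        rw [pvDrop_left a ('\n' :: b) hja] at hj
        rw [pvPrefix_append_left _ (by simp [List.length_drop]; omega)] at hj
        exact ((PySem.Chars.isIn_iff_infix p a).mp
          ((PySem.Chars.exists_prefix_drop_iff_isIn p a).mp ⟨j, hj⟩))
      · exact absurd hj (fun h' => pvNoSpan hnl hja (by omega) h')
    · right
      have hj' : p <+: b.drop (j - a.length - 1) := by
        have : a.length + 1 + (j - a.length - 1) = j := by omega
        rw [← this, pvDrop_right] at hj
        exact hj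
      exact ((PySem.Chars.isIn_iff_infix p b).mp
        ((PySem.Chars.exists_prefix_drop_iff_isIn p b).mp ⟨_, hj'⟩))
  · rintro (h | h)
    · exact h.trans ⟨[], '\n' :: b, by simp⟩
    · exact h.trans ((List.suffix_cons '\n' b).trans (List.suffix_append a _)).isInfix

-- ---- find: first-occurrence characterisation ----

lemma pvFind_eq_of {s p : List Char} (j : Nat) (hj : p <+: s.drop j)
    (hmin : ∀ i < j, ¬ p <+: s.drop i) : PySem.Chars.find s p = j := by
  have hin : p <:+: s := ((PySem.Chars.isIn_iff_infix p s).mp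
    ((PySem.Chars.exists_prefix_drop_iff_isIn p s).mp ⟨j, hj⟩))
  have hpos : 0 ≤ PySem.Chars.find s p := (PySem.Chars.find_nonneg_iff s p).mpr hin
  obtain ⟨h1, h2⟩ := PySem.Chars.find_spec hpos
  rcases Nat.lt_trichotomy (PySem.Chars.find s p).toNat j with h | h | h
  · exact absurd h1 (hmin _ h)
  · omega
  · exact absurd hj (h2 j h)

lemma pvFind_left {a : List Char} (b p : List Char) (hnl : '\n' ∉ p) (ha : p <:+: a) :
    PySem.Chars.find (a ++ '\n' :: b) p = PySem.Chars.find a p ∧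
      (PySem.Chars.find a p).toNat + p.length ≤ a.length := by
  have hpos : 0 ≤ PySem.Chars.find a p := (PySem.Chars.find_nonneg_iff a p).mpr ha
  obtain ⟨h1, h2⟩ := PySem.Chars.find_spec hpos
  set fa := (PySem.Chars.find a p).toNat with hfa
  have hlen : fa + p.length ≤ a.length := by
    have := h1.length_le
    simp [List.length_drop] at this
    have hle : PySem.Chars.find a p ≤ (a.length : Int) := PySem.Chars.find_le_length a p
    omega
  refine ⟨?_, hlen⟩
  have : PySem.Chars.find (a ++ '\n' :: b) p = (fa : Int) := by
    apply pvFind_eq_of fa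
    · rw [pvDrop_left a _ (by omega)]
      rw [pvPrefix_append_left _ (by simp [List.length_drop]; omega)]
      exact h1
    · intro i hi hpi
      have hia : i ≤ a.length := by omega
      by_cases hfit : i + p.length ≤ a.length
      · rw [pvDrop_left a _ hia,
          pvPrefix_append_left _ (by simp [List.length_drop]; omega)] at hpi
        exact h2 i hi hpi
      · exact pvNoSpan hnl hia (by omega) hpi
  omega

lemma pvFind_append (a b p : List Char) (hnl : '\n' ∉ p) (ha : ¬ p <:+: a) :
    PySem.Chars.find (a ++ '\n' :: b) p =
      if PySem.Chars.find b p = -1 then -1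
      else (a.length : Int) + 1 + PySem.Chars.find b p := by
  by_cases hb : p <:+: b
  · have hpos : 0 ≤ PySem.Chars.find b p := (PySem.Chars.find_nonneg_iff b p).mpr hb
    rw [if_neg (by omega)]
    obtain ⟨h1, h2⟩ := PySem.Chars.find_spec hpos
    set fb := (PySem.Chars.find b p).toNat with hfb
    have : PySem.Chars.find (a ++ '\n' :: b) p = ((a.length + 1 + fb : Nat) : Int) := by
      apply pvFind_eq_of
      · rw [pvDrop_right a b fb]; exact h1
      · intro i hi hpi
        by_cases hia : i ≤ a.length
        · by_cases hfit : i + p.length ≤ a.length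
          · rw [pvDrop_left a _ hia,
              pvPrefix_append_left _ (by simp [List.length_drop]; omega)] at hpi
            exact ha (((PySem.Chars.isIn_iff_infix p a).mp
              ((PySem.Chars.exists_prefix_drop_iff_isIn p a).mp ⟨i, hpi⟩)))
          · exact pvNoSpan hnl hia (by omega) hpi
        · have hk : a.length + 1 + (i - a.length - 1) = i := by omega
          rw [← hk, pvDrop_right] at hpi
          exact h2 _ (by omega) hpi
    rw [this]; push_cast; omega
  · rw [if_pos ((PySem.Chars.find_eq_neg_one_iff b p).mpr hb)]
    rw [PySem.Chars.find_eq_neg_one_iff]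
    rw [pvInfix_split a b hnl]
    rintro (h | h)
    · exact ha h
    · exact hb h

-- ---- rfind: last-occurrence characterisation ----

lemma pvRgo_spec (s p : List Char) : ∀ j : Nat,
    (PySem.Chars.rfind.go s p j = -1 ∧ ∀ i ≤ j, ¬ p <+: s.drop i) ∨
    (∃ i : Nat, i ≤ j ∧ PySem.Chars.rfind.go s p j = (i : Int) ∧ p <+: s.drop i ∧
      ∀ k, i < k → k ≤ j → ¬ p <+: s.drop k) := by
  intro j
  induction j with
  | zero =>
    by_cases h : p.isPrefixOf s
    · right
      exact ⟨0, le_refl 0, by simp [PySem.Chars.rfind.go, h],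
        by simpa using List.isPrefixOf_iff_prefix.mp h, by omega⟩
    · left
      refine ⟨by simp [PySem.Chars.rfind.go, h], ?_⟩
      intro i hi
      interval_cases i
      simpa using fun hc => h (List.isPrefixOf_iff_prefix.mpr (by simpa using hc))
  | succ j ih =>
    by_cases h : p.isPrefixOf (s.drop (j + 1))
    · right
      exact ⟨j + 1, le_refl _, by simp [PySem.Chars.rfind.go, h],
        List.isPrefixOf_iff_prefix.mp h, by omega⟩
    · have hnot : ¬ p <+: s.drop (j + 1) :=
        fun hc => h (List.isPrefixOf_iff_prefix.mpr hc)
      rcases ih with ⟨h1, h2⟩ | ⟨i, hi1, hi2, hi3, hi4⟩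
      · left
        refine ⟨by simp [PySem.Chars.rfind.go, h, h1], ?_⟩
        intro i hi
        rcases Nat.lt_or_ge i (j + 1) with hlt | hge
        · exact h2 i (by omega)
        · have : i = j + 1 := by omega
          subst this; exact hnot
      · right
        refine ⟨i, by omega, by simp [PySem.Chars.rfind.go, h, hi2], hi3, ?_⟩
        intro k hk1 hk2
        rcases Nat.lt_or_ge k (j + 1) with hlt | hge
        · exact hi4 k hk1 (by omega)
        · have : k = j + 1 := by omega
          subst this; exact hnot

lemma pvRfind_neg_iff {s p : List Char} (hp : p ≠ []) :
    PySem.Chars.rfind s p = -1 ↔ ∀ i, ¬ p <+: s.drop i := by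
  constructor
  · intro h i
    rcases pvRgo_spec s p s.length with ⟨h1, h2⟩ | ⟨k, hk1, hk2, _, _⟩
    · by_cases hle : i ≤ s.length
      · exact h2 i hle
      · rw [List.drop_eq_nil_of_le (by omega)]
        intro hc
        exact hp (List.prefix_nil.mp hc)
    · rw [show PySem.Chars.rfind s p = PySem.Chars.rfind.go s p s.length from rfl, hk2] at h
      omega
  · intro h
    rcases pvRgo_spec s p s.length with ⟨h1, _⟩ | ⟨k, _, _, hk3, _⟩
    · exact h1
    · exact absurd hk3 (h k)

lemma pvRfind_eq_of {s p : List Char} (hp : p ≠ []) (j : Nat) (hj : p <+: s.drop j)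
    (hmax : ∀ i, j < i → ¬ p <+: s.drop i) : PySem.Chars.rfind s p = j := by
  have hjs : j ≤ s.length := by
    by_contra hc
    rw [List.drop_eq_nil_of_le (by omega)] at hj
    exact hp (List.prefix_nil.mp hj)
  rcases pvRgo_spec s p s.length with ⟨h1, h2⟩ | ⟨k, hk1, hk2, hk3, hk4⟩
  · exact absurd hj (h2 j hjs)
  · rw [show PySem.Chars.rfind s p = PySem.Chars.rfind.go s p s.length from rfl, hk2]
    rcases Nat.lt_trichotomy k j with h | h | h
    · exact absurd hj (hk4 j h hjs)
    · omega
    · exact absurd hk3 (hmax k h)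

lemma pvRfind_no_nl {u : List Char} (h : '\n' ∉ u) : PySem.Chars.rfind u ['\n'] = -1 := by
  rw [pvRfind_neg_iff (by simp)]
  intro i hc
  exact h (List.drop_subset i u (hc.subset (by simp)))

lemma pvRfind_append (a u : List Char) :
    PySem.Chars.rfind (a ++ '\n' :: u) ['\n'] =
      if PySem.Chars.rfind u ['\n'] = -1 then (a.length : Int)
      else (a.length : Int) + 1 + PySem.Chars.rfind u ['\n'] := by
  by_cases hu : PySem.Chars.rfind u ['\n'] = -1
  · rw [if_pos hu]
    apply pvRfind_eq_of (by simp) a.length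
    · rw [pvDrop_left a _ (le_refl _), List.drop_eq_nil_of_le (le_refl _)]
      simp
    · intro i hi
      have hk : a.length + 1 + (i - a.length - 1) = i := by omega
      rw [← hk, pvDrop_right]
      exact (pvRfind_neg_iff (by simp)).mp hu _
  · rcases pvRgo_spec u ['\n'] u.length with ⟨h1, _⟩ | ⟨k, hk1, hk2, hk3, hk4⟩
    · exact absurd h1 hu
    · have hru : PySem.Chars.rfind u ['\n'] = (k : Int) := hk2
      rw [if_neg hu, hru]
      have : PySem.Chars.rfind (a ++ '\n' :: u) ['\n'] = ((a.length + 1 + k : Nat) : Int) := by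
        apply pvRfind_eq_of (by simp)
        · rw [pvDrop_right]; exact hk3
        · intro i hi
          have hk' : a.length + 1 + (i - a.length - 1) = i := by omega
          rw [← hk', pvDrop_right]
          by_cases hle : i - a.length - 1 ≤ u.length
          · exact hk4 _ (by omega) hle
          · rw [List.drop_eq_nil_of_le (by omega)]
            simp
      rw [this]; push_cast; omega

-- code.rfind('\n', 0, e) = rfind on the prefix before e
lemma pvRFF (cs : List Char) (e : Int) (h0 : 0 ≤ e) (hl : e ≤ cs.length) :
    PySem.Chars.rfindFrom cs ['\n'] 0 (some e) = PySem.Chars.rfind (cs.take e.toNat) ['\n'] := by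
  simp only [PySem.Chars.rfindFrom]
  split_ifs <;> first | omega | simp_all

-- rfind's result is -1 or a valid index
lemma pvRfind_lt (s : List Char) (h : PySem.Chars.rfind s ['\n'] ≠ -1) :
    ∃ k : Nat, PySem.Chars.rfind s ['\n'] = (k : Int) ∧ k < s.length := by
  rcases pvRgo_spec s ['\n'] s.length with ⟨h1, _⟩ | ⟨k, hk1, hk2, hk3, _⟩
  · exact absurd h1 h
  · refine ⟨k, hk2, ?_⟩
    have := hk3.length_le
    simp only [List.length_drop, List.length_singleton] at this
    omega

-- when no '\n' precedes the match, B prepends the comment line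
lemma pvB_start0 (s : List Char) (hf : 0 ≤ PySem.Chars.find s pvPat)
    (hnl : '\n' ∉ s.take (PySem.Chars.find s pvPat).toNat) :
    pvBchars s = pvCN ++ s := by
  simp only [pvBchars]
  rw [if_neg (by omega), pvRfind_no_nl hnl]
  norm_num

-- the pattern occurs in the joined string iff it occurs in some line
lemma pvInfix_join : ∀ (L : List (List Char)), L ≠ [] →
    (pvPat <:+: PySem.Chars.join ['\n'] L ↔ ∃ l ∈ L, pvPat <:+: l) := by
  intro L
  induction L with
  | nil => intro h; exact absurd rfl h
  | cons a M ih =>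
    intro _
    cases M with
    | nil => simp [PySem.Chars.join_singleton]
    | cons b t =>
      rw [pvJoin_cons a (b :: t) (by simp),
        pvInfix_split a _ pvPat_no_nl, ih (by simp)]
      simp

-- ---- the main bridge: B's raw-string splice equals A's line-level insertion ----

lemma pvMain : ∀ (L : List (List Char)), L ≠ [] → (∀ l ∈ L, '\n' ∉ l) →
    pvBchars (PySem.Chars.join ['\n'] L) =
      match L.findIdx? (fun l => PySem.Chars.isIn pvPat l) with
      | none => PySem.Chars.join ['\n'] L
      | some i => PySem.Chars.join ['\n'] (L.take i ++ [pvCm] ++ L.drop i) := by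
  intro L
  induction L with
  | nil => intro h; exact absurd rfl h
  | cons a M ih =>
    intro _ hfree
    have hnla : '\n' ∉ a := hfree a (by simp)
    cases M with
    | nil =>
      -- single line: the joined string is the line itself
      rw [PySem.Chars.join_singleton]
      by_cases hin : PySem.Chars.isIn pvPat a = true
      · rw [List.findIdx?_cons, if_pos hin]
        have hf : 0 ≤ PySem.Chars.find a pvPat :=
          (PySem.Chars.find_nonneg_iff a pvPat).mpr ((PySem.Chars.isIn_iff_infix pvPat a).mp hin)
        rw [pvB_start0 a hf (fun hc => hnla (List.take_subset _ a hc))]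
        simp [PySem.Chars.join_cons_cons, PySem.Chars.join_singleton, pvCN_eq]
      · rw [List.findIdx?_cons, if_neg hin]
        simp only [pvBchars, List.findIdx?_nil, Option.map_none]
        rw [if_pos ((PySem.Chars.find_eq_neg_one_iff a pvPat).mpr
          (fun hc => hin ((PySem.Chars.isIn_iff_infix pvPat a).mpr hc)))]
    | cons b t =>
      have hM : (b :: t : List (List Char)) ≠ [] := by simp
      have hfreeM : ∀ l ∈ (b :: t : List (List Char)), '\n' ∉ l :=
        fun l hl => hfree l (by simp [hl])
      set u := PySem.Chars.join ['\n'] (b :: t) with hu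
      rw [pvJoin_cons a (b :: t) hM]
      by_cases hin : PySem.Chars.isIn pvPat a = true
      · -- pattern in the first line: comment goes to the very front
        have ha : pvPat <:+: a := (PySem.Chars.isIn_iff_infix pvPat a).mp hin
        obtain ⟨hfeq, hbound⟩ := pvFind_left u pvPat pvPat_no_nl ha
        have hf0 : 0 ≤ PySem.Chars.find a pvPat := (PySem.Chars.find_nonneg_iff a pvPat).mpr ha
        have hfs0 : 0 ≤ PySem.Chars.find (a ++ '\n' :: u) pvPat := by rw [hfeq]; exact hf0
        have hpatlen : 0 < pvPat.length := by decide
        have htake : (a ++ '\n' :: u).take (PySem.Chars.find (a ++ '\n' :: u) pvPat).toNat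
            = a.take (PySem.Chars.find a pvPat).toNat := by
          rw [hfeq, List.take_append_of_le_length (by omega)]
        rw [pvB_start0 _ hfs0 (by rw [htake]; exact fun hc => hnla (List.take_subset _ a hc))]
        rw [List.findIdx?_cons, if_pos hin]
        show pvCN ++ (a ++ '\n' :: u)
          = PySem.Chars.join ['\n'] ((a :: b :: t).take 0 ++ [pvCm] ++ (a :: b :: t).drop 0)
        rw [show ((a :: b :: t).take 0 ++ [pvCm] ++ (a :: b :: t).drop 0)
              = pvCm :: a :: b :: t by simp]
        rw [PySem.Chars.join_cons_cons, pvJoin_cons a (b :: t) hM, pvCN_eq, ← hu]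
      · have hna : ¬ pvPat <:+: a :=
          fun hc => hin ((PySem.Chars.isIn_iff_infix pvPat a).mpr hc)
        have hfs := pvFind_append a u pvPat pvPat_no_nl hna
        rw [List.findIdx?_cons, if_neg hin]
        by_cases hfu : PySem.Chars.find u pvPat = -1
        · -- no occurrence anywhere
          rw [if_pos hfu] at hfs
          have hnone : List.findIdx? (fun l => PySem.Chars.isIn pvPat l) (b :: t) = none := by
            rw [List.findIdx?_eq_none_iff]
            intro x hx
            by_contra hc
            have hxin : pvPat <:+: x := (PySem.Chars.isIn_iff_infix pvPat x).mp
              (by revert hc; cases (PySem.Chars.isIn pvPat x) <;> simp)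
            exact ((PySem.Chars.find_eq_neg_one_iff u pvPat).mp hfu)
              ((pvInfix_join (b :: t) hM).mpr ⟨x, hx, hxin⟩)
          rw [hnone]
          simp only [pvBchars, Option.map_none]
          rw [if_pos hfs, ← pvJoin_cons a (b :: t) hM]
        · -- first occurrence is in the tail
          rw [if_neg hfu] at hfs
          have hfu0 : 0 ≤ PySem.Chars.find u pvPat := by
            have := PySem.Chars.neg_one_le_find u pvPat; omega
          have hful : PySem.Chars.find u pvPat ≤ (u.length : Int) :=
            PySem.Chars.find_le_length u pvPat
          set fu := (PySem.Chars.find u pvPat).toNat with hfut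
          have hfs0 : 0 ≤ PySem.Chars.find (a ++ '\n' :: u) pvPat := by rw [hfs]; omega
          have hposnat : (PySem.Chars.find (a ++ '\n' :: u) pvPat).toNat
              = a.length + 1 + fu := by rw [hfs]; omega
          have htake : (a ++ '\n' :: u).take (a.length + 1 + fu)
              = a ++ '\n' :: u.take fu := by
            rw [List.take_append, List.take_of_length_le (by omega)]
            have h1 : a.length + 1 + fu - a.length = 1 + fu := by omega
            rw [h1]
            simp [Nat.add_comm 1 fu]
          -- the section B scans with rfind
          set ru := PySem.Chars.rfind (u.take fu) ['\n'] with hru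
          have hrfind : PySem.Chars.rfind ((a ++ '\n' :: u).take
              (PySem.Chars.find (a ++ '\n' :: u) pvPat).toNat) ['\n']
              = if ru = -1 then (a.length : Int) else (a.length : Int) + 1 + ru := by
            rw [hposnat, htake, pvRfind_append]
          -- start indices: start on the whole string = |a| + 1 + start on u
          have hstart : ∃ su : Nat, ru + 1 = (su : Int) ∧ su ≤ u.length ∧
              (PySem.Chars.rfind ((a ++ '\n' :: u).take
                (PySem.Chars.find (a ++ '\n' :: u) pvPat).toNat) ['\n'] + 1).toNat
              = a.length + 1 + su := by
            by_cases hr1 : ru = -1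
            · exact ⟨0, by omega, by omega, by rw [hrfind, if_pos hr1]; omega⟩
            · obtain ⟨k, hk1, hk2⟩ := pvRfind_lt (u.take fu) hr1
              refine ⟨k + 1, by omega, ?_, by rw [hrfind, if_neg hr1]; omega⟩
              simp only [List.length_take] at hk2
              omega
          obtain ⟨su, hsu1, hsu2, hsu3⟩ := hstart
          -- B on the whole string = a ++ '\n' :: (B on u)
          have hB : pvBchars (a ++ '\n' :: u) = a ++ '\n' :: pvBchars u := by
            simp only [pvBchars]
            rw [if_neg (by omega), if_neg hfu, ← hfut, ← hru, hsu3, hsu1]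
            have htk : (a ++ '\n' :: u).take (a.length + 1 + su)
                = a ++ '\n' :: u.take su := by
              rw [List.take_append, List.take_of_length_le (by omega)]
              have h1 : a.length + 1 + su - a.length = 1 + su := by omega
              rw [h1]
              simp [Nat.add_comm 1 su]
            rw [htk, pvDrop_right, Int.toNat_natCast]
            simp
          rw [hB]
          -- the tail has a matching line
          have hhit : pvPat <:+: u := (PySem.Chars.find_ne_neg_one_iff u pvPat).mp hfu
          cases hfi : List.findIdx? (fun l => PySem.Chars.isIn pvPat l) (b :: t) with
          | none =>
            rw [List.findIdx?_eq_none_iff] at hfi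
            obtain ⟨l, hl, hlin⟩ := (pvInfix_join (b :: t) hM).mp hhit
            have := hfi l hl
            rw [(PySem.Chars.isIn_iff_infix pvPat l).mpr hlin] at this
            exact absurd this (by simp)
          | some i =>
            have hIH := ih hM hfreeM
            rw [hfi] at hIH
            rw [hIH]
            simp only [Option.map_some, List.take_succ_cons, List.drop_succ_cons]
            rw [show (a :: (b :: t).take i ++ [pvCm] ++ (b :: t).drop i)
                  = a :: ((b :: t).take i ++ [pvCm] ++ (b :: t).drop i) by simp]
            rw [pvJoin_cons a _ (by simp)]

-- ---- A-side: A's loop inserts before the first line containing "for " ----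

lemma pvMemWindow (lines : List String) (i : Nat) (h : i < lines.length) :
    lines[i] ∈ PySem.List.slice lines (some (max 0 ((i:Int)-2))) (some ((i:Int)+3)) := by
  rw [PySem.List.slice_toNat lines (le_max_left _ _) (by omega)]
  have ha : (max 0 ((i:Int)-2)).toNat = i - 2 := by omega
  have hb : ((i:Int)+3).toNat = i + 3 := by omega
  rw [ha, hb]
  have hgl : i - (i-2) < (List.take (i + 3 - (i-2)) (lines.drop (i-2))).length := by
    simp [List.length_take, List.length_drop]; omega
  have heq : (List.take (i + 3 - (i-2)) (lines.drop (i-2)))[i - (i-2)]'hgl = lines[i] := by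
    rw [List.getElem_take, List.getElem_drop]
    congr 1
    omega
  exact heq ▸ List.getElem_mem hgl

lemma pvALoop_spec (lines : List String) : ∀ (n i : Nat), lines.length - i ≤ n →
    pvALoop lines i =
      match (lines.drop i).findIdx? (fun l => PySem.Str.isIn "for " l) with
      | none => lines
      | some j => lines.take (i+j) ++ [pvComment] ++ lines.drop (i+j) := by
  intro n
  induction n with
  | zero =>
    intro i hi
    have hle : lines.length ≤ i := by omega
    rw [pvALoop, dif_neg (by omega), List.drop_eq_nil_of_le hle]
    simp
  | succ n ih =>
    intro i hi
    by_cases h : i < lines.length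
    · rw [pvALoop, dif_pos h, ← List.getElem_cons_drop h, List.findIdx?_cons]
      by_cases hp : PySem.Str.isIn "for " lines[i] = true
      · have hany : (PySem.List.slice lines (some (max 0 ((i:Int)-2))) (some ((i:Int)+3))).any
            (fun l => PySem.Str.isIn "for " l) = true :=
          List.any_eq_true.mpr ⟨_, pvMemWindow lines i h, hp⟩
        rw [if_pos (by simp only [hp, hany, Bool.and_self]), if_pos hp]
        rw [PySem.List.insert_natCast lines i pvComment (le_of_lt h)]
        simp
      · rw [if_neg (by intro hab; rw [Bool.and_eq_true] at hab; exact hp hab.1), if_neg hp,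
          ih (i+1) (by omega)]
        cases hfi : (lines.drop (i+1)).findIdx? (fun l => PySem.Str.isIn "for " l) with
        | none => simp
        | some j =>
          simp only [Option.map_some]
          have : i + 1 + j = i + (j + 1) := by omega
          rw [this]
    · rw [pvALoop, dif_neg h, List.drop_eq_nil_of_le (by omega)]
      simp

-- ---- B port at the char level ----

lemma pvBalt_chars (code : String) (bottleneck : List (String × Int))
    (h : ¬ (PySem.Dict.ofList bottleneck).getD "complexity" 2 ≤ 2) :
    (optimize_nested_loops_py_alt code bottleneck).toList = pvBchars code.toList := by
  simp only [optimize_nested_loops_py_alt]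
  rw [if_neg h]
  have hfind : PySem.Str.find code "for " = PySem.Chars.find code.toList pvPat := by
    rw [PySem.Str.find_eq]; rfl
  by_cases hf : PySem.Str.find code "for " = -1
  · rw [if_pos hf]
    simp only [pvBchars]
    rw [if_pos (by rw [← hfind]; exact hf)]
  · rw [if_neg hf]
    have h0 : 0 ≤ PySem.Str.find code "for " := by
      have := PySem.Chars.neg_one_le_find code.toList pvPat
      rw [hfind]; omega
    have hlen : PySem.Str.find code "for " ≤ (code.toList.length : Int) := by
      rw [hfind]; exact PySem.Chars.find_le_length _ _
    have hrf : PySem.Str.rfindFrom code "\n" 0 (some (PySem.Str.find code "for ")) =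
        PySem.Chars.rfind (code.toList.take (PySem.Str.find code "for ").toNat) ['\n'] := by
      rw [PySem.Str.rfindFrom_eq, show ("\n" : String).toList = ['\n'] from rfl]
      exact pvRFF code.toList _ h0 hlen
    have hr1 : -1 ≤ PySem.Chars.rfind
        (code.toList.take (PySem.Str.find code "for ").toNat) ['\n'] := by
      by_cases hx : PySem.Chars.rfind
          (code.toList.take (PySem.Str.find code "for ").toNat) ['\n'] = -1
      · omega
      · obtain ⟨k, hk, _⟩ := pvRfind_lt _ hx; omega
    simp only [String.toList_append, PySem.Str.toList_slice, PySem.Chars.slice_eq_listSlice]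
    rw [hrf, PySem.List.slice_to _ (by omega), PySem.List.slice_from _ (by omega)]
    simp only [pvBchars]
    rw [if_neg (by rw [← hfind]; exact hf), ← hfind]
    rfl

-- ===== VERDICT (by name: the statement is the Claim_ definition above) =====
theorem optimize_nested_loops_py_spec : Claim_equal_optimize_nested_loops_py := by
  intro code bottleneck _dom
  unfold Spec_optimize_nested_loops_py
  by_cases hcc : (PySem.Dict.ofList bottleneck).getD "complexity" 2 ≤ 2
  · simp only [optimize_nested_loops_py, optimize_nested_loops_py_alt]
    rw [if_pos hcc, if_neg (by omega)]
    exact pvRoundtrip code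
  · apply String.toList_inj.mp
    rw [pvBalt_chars code bottleneck hcc]
    simp only [optimize_nested_loops_py]
    rw [if_pos (by omega)]
    set lines := (PySem.Str.split? code "\n").getD [] with hlines
    have hspec := pvALoop_spec lines lines.length 0 (by omega)
    rw [List.drop_zero] at hspec
    rw [hspec]
    have hLc : lines.map String.toList = pvSp code.toList [] := pvSplit_char code
    have hLne : pvSp code.toList [] ≠ [] := pvSp_ne_nil _ _
    have hLfree : ∀ l ∈ pvSp code.toList [], '\n' ∉ l := pvSp_no_nl _ [] (by simp)
    have hjoin : PySem.Chars.join ['\n'] (pvSp code.toList []) = code.toList := by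
      simpa using pvJoin_sp code.toList []
    have hmain := pvMain (pvSp code.toList []) hLne hLfree
    rw [hjoin] at hmain
    have hidx : List.findIdx? (fun l => PySem.Chars.isIn pvPat l) (pvSp code.toList [])
        = List.findIdx? (fun l => PySem.Str.isIn "for " l) lines := by
      rw [← hLc, List.findIdx?_map]
      have hfun : ((fun l => PySem.Chars.isIn pvPat l) ∘ String.toList)
          = (fun l => PySem.Str.isIn "for " l) := by
        funext l
        rw [Function.comp_apply, PySem.Str.isIn_eq]
        rfl
      rw [hfun]
    rw [hidx] at hmain
    rw [hmain]
    cases hfi : List.findIdx? (fun l => PySem.Str.isIn "for " l) lines with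
    | none => exact congrArg String.toList (pvRoundtrip code)
    | some i =>
      rw [PySem.Str.toList_join, show ("\n" : String).toList = ['\n'] from rfl]
      rw [List.map_append, List.map_append, List.map_take, List.map_drop, hLc]
      simp [pvCm]
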